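-- pv_equiv track=rewrite | github.com/DomeGitHub101/lab_week1 | LabWeek1/lab5_week1.py | find_min_number
-- ===== SOURCE A (Python) =====
-- def find_min_number(nums):
--     x = nums.split()
--     if len(x) > 10 or len(x) == 1:
--         return "Invalid"
--     for i in x:
--         if not i.isdigit() or int(i)>9:
--             return "Invalid"
--
--     x = list(map(int, x))
--     x.sort()
--
--     if x[0] == 0:
--         for i in range(1, len(x)):
--             if x[i] != 0:
--                 x[0], x[i] = x[i], x[0]
--                 break
--
--     return ''.join(map(str, x))
-- ===== SOURCE B (Python) =====
-- def find_min_number(nums):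
--     parts = nums.split()
--     if len(parts) > 10 or len(parts) == 1:
--         return "Invalid"
--     counts = [0] * 10
--     for p in parts:
--         if not p.isdigit() or int(p) > 9:
--             return "Invalid"
--         counts[int(p)] += 1
--     nz = 0
--     for d in range(1, 10):
--         if counts[d] > 0:
--             nz = d
--             break
--     if counts[0] > 0 and nz > 0:
--         counts[nz] -= 1
--         out = str(nz) + "0" * counts[0]
--         for d in range(1, 10):
--             out += str(d) * counts[d]
--         return out
--     out = ""
--     for d in range(10):
--         out += str(d) * counts[d]
--     return out
-- ===== Notes on version B (the rewrite author's own statement) =====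
-- stated objective: alternative
-- what changed: Replaces sort-then-swap-first-nonzero with a counting sort: one combined validation+tally pass over the tokens into a 10-slot count array, then the result string is built directly (smallest nonzero digit, zeros, remaining digits ascending).
-- outside the precondition, e.g. on find_min_number(''): A raises IndexError, B returns ''
import Mathlib
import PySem

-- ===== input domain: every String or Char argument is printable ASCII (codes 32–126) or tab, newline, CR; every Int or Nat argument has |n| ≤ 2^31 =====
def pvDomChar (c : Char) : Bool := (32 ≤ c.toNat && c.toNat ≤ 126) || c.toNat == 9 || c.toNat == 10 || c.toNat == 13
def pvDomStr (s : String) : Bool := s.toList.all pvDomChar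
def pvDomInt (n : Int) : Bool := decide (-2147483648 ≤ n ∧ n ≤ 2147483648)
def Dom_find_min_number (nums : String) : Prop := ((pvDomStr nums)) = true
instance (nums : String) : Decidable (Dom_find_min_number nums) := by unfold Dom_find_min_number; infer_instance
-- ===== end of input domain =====

-- B replaces A's sort-then-swap with a counting sort (one tally pass, then direct construction); objective: alternative.


-- ===== PORT A =====
-- int(i) under the guarantee i.isdigit(): `(ofStr? i).getD 0` (ofStr? is some there; getD is never the default on reached code)
def pvVal (i : String) : Int := (PySem.Int.ofStr? i).getD 0

-- A's validation loop: `for i in x: if not i.isdigit() or int(i)>9: return "Invalid"`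
def pvACheck : List String → Bool
  | [] => true
  | i :: rest =>
    if PySem.Str.strIsdigit i = false ∨ 9 < pvVal i then false else pvACheck rest

-- A's swap loop `for i in range(1,len(x)): if x[i] != 0: x[0],x[i] = x[i],x[0]; break`;
-- indices come from range(1,len(x)) so List.getD/set at Nat indices is exact here.
def pvASwap (x : List Int) : List Nat → List Int
  | [] => x
  | i :: rest =>
    if x.getD i 0 ≠ 0 then (x.set 0 (x.getD i 0)).set i (x.getD 0 0)
    else pvASwap x rest

def find_min_number (nums : String) : String :=
  let x := PySem.Str.split₀ nums
  if x.length > 10 ∨ x.length = 1 then "Invalid"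
  else if pvACheck x = false then "Invalid"
  else
    let y := PySem.List.sorted (x.map pvVal) (fun v => v) false
    -- `if x[0] == 0:` — under Pre_ x is nonempty, so getD 0 is exact
    let y' := if y.getD 0 0 = 0 then pvASwap y (List.range' 1 (y.length - 1)) else y
    PySem.Str.join "" (y'.map PySem.Int.toStr)

-- ===== PORT B =====
-- Python's  s * n  on strings
def pvStrMul (s : String) (n : Int) : String := PySem.Str.join "" (List.replicate n.toNat s)

-- int(p) in B, under the same guard as in A
def pvBVal (p : String) : Int := (PySem.Int.ofStr? p).getD 0

-- B's single validation + tally pass; none = "Invalid".  counts[int(p)] += 1: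
-- int(p) is a digit 0..9 under the guard, so the Nat index via toNat is exact.
def pvBCount : List String → List Int → Option (List Int)
  | [], counts => some counts
  | p :: rest, counts =>
    if PySem.Str.strIsdigit p = false ∨ 9 < pvBVal p then none
    else pvBCount rest (counts.set (pvBVal p).toNat (counts.getD (pvBVal p).toNat 0 + 1))

-- B's `for d in range(1,10): if counts[d] > 0: nz = d; break`
def pvBFirstNZ (counts : List Int) : List Nat → Nat
  | [] => 0
  | d :: rest => if 0 < counts.getD d 0 then d else pvBFirstNZ counts rest

-- B's `for d in …: out += str(d) * counts[d]`
def pvBBuild (counts : List Int) : List Nat → String → String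
  | [], out => out
  | d :: rest, out => pvBBuild counts rest (out ++ pvStrMul (PySem.Int.toStr (d : Int)) (counts.getD d 0))

def find_min_number_alt (nums : String) : String :=
  let parts := PySem.Str.split₀ nums
  if parts.length > 10 ∨ parts.length = 1 then "Invalid"
  else
    match pvBCount parts (List.replicate 10 0) with
    | none => "Invalid"
    | some counts =>
      let nz := pvBFirstNZ counts (List.range' 1 9)
      if 0 < counts.getD 0 0 ∧ 0 < nz then
        let counts' := counts.set nz (counts.getD nz 0 - 1)
        let out := PySem.Int.toStr (nz : Int) ++ pvStrMul "0" (counts'.getD 0 0)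
        pvBBuild counts' (List.range' 1 9) out
      else pvBBuild counts (List.range' 0 10) ""

-- ===== PRECONDITION & SPEC =====
-- Pre_ excludes only whitespace-only strings: there split() is empty and A raises IndexError at x[0].
def Pre_find_min_number (nums : String) : Prop := PySem.Str.split₀ nums ≠ []
instance (nums : String) : Decidable (Pre_find_min_number nums) := by unfold Pre_find_min_number; infer_instance
def pvWitness_find_min_number : String := "3 0 0 2 1"

def Spec_find_min_number (nums : String) (out : String) : Prop := out = find_min_number_alt nums
instance (nums : String) (out : String) : Decidable (Spec_find_min_number nums out) := by unfold Spec_find_min_number; infer_instance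

-- ===== CLAIM (what is proved, stated in full; the proofs are below) =====
def Claim_equal_find_min_number : Prop := ∀ (nums : String), Dom_find_min_number nums → Pre_find_min_number nums → Spec_find_min_number nums (find_min_number nums)

-- ===== LEMMAS AND PROOFS =====

-- digit characters are not int()-whitespace
theorem pv_isdigit_not_space (c : Char) (h : PySem.Chars.isdigit c = true) : PySem.Int.isIntSpace c = false := by
  simp [PySem.Chars.isdigit] at h
  simp [PySem.Int.isIntSpace]
  refine ⟨⟨⟨⟨⟨?_,?_⟩,?_⟩,?_⟩,?_⟩,?_⟩ <;> (rintro rfl; exact absurd h (by decide))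

-- int(s) of an isdigit() string is parsed without sign: the value is a Nat cast, hence nonnegative
theorem pv_val_nonneg_chars (cs : List Char) (h : PySem.Chars.strIsdigit cs = true) :
    0 ≤ (PySem.Int.ofChars? cs).getD 0 := by
  simp [PySem.Chars.strIsdigit] at h
  obtain ⟨h1, h2⟩ := h
  have hnd : ∀ c ∈ cs, PySem.Int.isIntSpace c = false := fun c hc => pv_isdigit_not_space c (h2 c hc)
  have hd1 : List.dropWhile PySem.Int.isIntSpace cs = cs := by
    cases cs with
    | nil => rfl
    | cons c t => rw [List.dropWhile_cons_of_neg]; simp [hnd c (by simp)]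
  have hd2 : List.dropWhile PySem.Int.isIntSpace cs.reverse = cs.reverse := by
    cases hr : cs.reverse with
    | nil => rfl
    | cons c t =>
      rw [List.dropWhile_cons_of_neg]
      simp [hnd c (by rw [← List.mem_reverse, hr]; simp)]
  simp only [PySem.Int.ofChars?, hd1, hd2, List.reverse_reverse]
  have gen : ∀ (o : Option ℕ), 0 ≤ ((do let a ← o; pure ((a:Int))).map (fun n => n)).getD 0 := by
    intro o; cases o <;> simp
  cases cs with
  | nil => simp at h1
  | cons c t =>
    have hc : PySem.Chars.isdigit c = true := h2 c (by simp)
    split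
    · rename_i ds heq; exfalso; injection heq with hh _; subst hh; exact absurd hc (by decide)
    · rename_i ds heq; exfalso; injection heq with hh _; subst hh; exact absurd hc (by decide)
    · apply gen

theorem pv_val_nonneg (p : String) (h : PySem.Str.strIsdigit p = true) : 0 ≤ pvVal p := by
  have := pv_val_nonneg_chars p.toList (by simpa using h)
  simpa [pvVal, PySem.Int.ofStr?] using this

theorem pvBVal_eq (p : String) : pvBVal p = pvVal p := rfl

-- a failed token makes B's pass return none
theorem pv_bcount_invalid (parts : List String) (h : pvACheck parts = false) :
    ∀ counts, pvBCount parts counts = none := by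
  induction parts with
  | nil => simp [pvACheck] at h
  | cons p rest ih =>
    intro counts
    by_cases hc : PySem.Str.strIsdigit p = false ∨ 9 < pvVal p
    · simp only [pvBCount, pvBVal_eq]; rw [if_pos hc]
    · simp only [pvACheck] at h; rw [if_neg hc] at h
      simp only [pvBCount, pvBVal_eq]; rw [if_neg hc]; exact ih h _

def pvStep (c : List Int) (p : String) : List Int := c.set (pvVal p).toNat (c.getD (pvVal p).toNat 0 + 1)

-- on all-valid tokens B's pass is a fold tallying the values
theorem pv_bcount_valid (parts : List String) (h : pvACheck parts = true) :
    ∀ counts, pvBCount parts counts = some (parts.foldl pvStep counts) := by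
  induction parts with
  | nil => intro counts; simp [pvBCount]
  | cons p rest ih =>
    intro counts
    by_cases hc : PySem.Str.strIsdigit p = false ∨ 9 < pvVal p
    · simp only [pvACheck] at h; rw [if_pos hc] at h; exact absurd h (by simp)
    · simp only [pvACheck] at h; rw [if_neg hc] at h
      simp only [pvBCount, pvBVal_eq]; rw [if_neg hc, ih h]; simp [pvStep]

theorem pv_acheck_ok (parts : List String) (h : pvACheck parts = true) :
    ∀ p ∈ parts, PySem.Str.strIsdigit p = true ∧ pvVal p ≤ 9 := by
  induction parts with
  | nil => simp
  | cons q rest ih =>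
    by_cases hc : PySem.Str.strIsdigit q = false ∨ 9 < pvVal q
    · simp only [pvACheck] at h; rw [if_pos hc] at h; exact absurd h (by simp)
    · simp only [pvACheck] at h; rw [if_neg hc] at h
      push_neg at hc
      intro p hp
      rcases List.mem_cons.mp hp with rfl | hp
      · exact ⟨by simpa using hc.1, by omega⟩
      · exact ih h p hp

theorem pv_fold_length (parts : List String) : ∀ counts : List Int, (parts.foldl pvStep counts).length = counts.length := by
  induction parts with
  | nil => simp
  | cons p rest ih => intro counts; simp [pvStep, ih]

-- the tally fold computes occurrence counts
theorem pv_fold_getD (parts : List String) (hv : ∀ p ∈ parts, 0 ≤ pvVal p ∧ pvVal p ≤ 9) :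
    ∀ (counts : List Int) (j : Nat), counts.length = 10 → j < 10 →
      (parts.foldl pvStep counts).getD j 0 = counts.getD j 0 + ((parts.map pvVal).count ((j : Nat) : Int) : Int) := by
  induction parts with
  | nil => intro counts j _ _; simp
  | cons p rest ih =>
    intro counts j hlen hj
    obtain ⟨h0, h9⟩ := hv p (by simp)
    have hrest : ∀ q ∈ rest, 0 ≤ pvVal q ∧ pvVal q ≤ 9 := fun q hq => hv q (by simp [hq])
    rw [List.foldl_cons, ih hrest _ j (by simp [pvStep, hlen]) hj]
    by_cases he : (pvVal p).toNat = j
    · subst he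
      have hcast : pvVal p = ((pvVal p).toNat : Int) := by omega
      have hl : (pvVal p).toNat < counts.length := by omega
      simp [pvStep, List.getD, List.getElem?_set_self hl, List.count_cons, ← hcast]
      omega
    · have hne : ¬ (pvVal p = ((j:Nat) : Int)) := by omega
      simp [pvStep, List.getD, List.getElem?_set_ne he, List.count_cons, hne]

-- ''.join distributes over the parts list
theorem pv_join_flatten (l : List (List Char)) : PySem.Chars.join [] l = l.flatten := by
  simp [PySem.Chars.join]
  induction l with
  | nil => rfl
  | cons h t ih => simp [List.intercalate] at *; cases t <;> simp_all [List.intercalate]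

theorem pv_sjoin_append (l1 l2 : List String) :
    PySem.Str.join "" (l1 ++ l2) = PySem.Str.join "" l1 ++ PySem.Str.join "" l2 := by
  simp [PySem.Str.join, pv_join_flatten, String.ofList_append]

theorem pv_sjoin_cons (s : String) (l : List String) :
    PySem.Str.join "" (s :: l) = s ++ PySem.Str.join "" l := by
  have h1 : PySem.Str.join "" [s] = s := by
    simp [PySem.Str.join, pv_join_flatten]
  calc PySem.Str.join "" (s :: l) = PySem.Str.join "" ([s] ++ l) := by simp
    _ = s ++ PySem.Str.join "" l := by rw [pv_sjoin_append, h1]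

-- str(d) * c  =  join of c copies of str(d)
theorem pv_strMul_join (j m : Nat) :
    pvStrMul (PySem.Int.toStr ((j:Nat):Int)) ((m : Nat) : Int)
      = PySem.Str.join "" ((List.replicate m (((j:Nat)):Int)).map PySem.Int.toStr) := by
  simp [pvStrMul, List.map_replicate]

-- B's build loop appends one run per index
theorem pv_build_eq (counts : List Int) :
    ∀ (js : List Nat) (out : String), pvBBuild counts js out
      = out ++ PySem.Str.join "" (js.map fun j => pvStrMul (PySem.Int.toStr ((j:Nat):Int)) (counts.getD j 0)) := by
  intro js
  induction js with
  | nil => intro out; simp [pvBBuild, PySem.Str.join, pv_join_flatten]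
  | cons j rest ih =>
    intro out
    simp only [pvBBuild, ih, List.map_cons, pv_sjoin_cons, String.append_assoc]

-- the built string is the join of the canonical digit list
theorem pv_buildJoin (g : Nat → Nat) : ∀ (js : List Nat) (counts : List Int),
    (∀ j ∈ js, counts.getD j 0 = (g j : Int)) →
    PySem.Str.join "" (js.map fun j => pvStrMul (PySem.Int.toStr ((j:Nat):Int)) (counts.getD j 0))
      = PySem.Str.join "" ((js.flatMap fun j => List.replicate (g j) (((j:Nat)):Int)).map PySem.Int.toStr) := by
  intro js
  induction js with
  | nil => intro counts _; rfl
  | cons j rest ih =>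
    intro counts hg
    simp only [List.map_cons, List.flatMap_cons, List.map_append, pv_sjoin_cons, pv_sjoin_append]
    rw [hg j (by simp), pv_strMul_join, ih counts (fun j hj => hg j (by simp [hj]))]

-- runs of increasing values concatenate to a ≤-sorted list
theorem pv_pairwise_canon (g : Nat → Nat) : ∀ (js : List Nat), js.Pairwise (· < ·) →
    (js.flatMap fun j => List.replicate (g j) (((j:Nat)):Int)).Pairwise (· ≤ ·) := by
  intro js
  induction js with
  | nil => simp
  | cons j rest ih =>
    intro hp
    rw [List.pairwise_cons] at hp
    simp only [List.flatMap_cons]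
    rw [List.pairwise_append]
    refine ⟨List.pairwise_replicate.mpr (by simp), ih hp.2, ?_⟩
    intro x hx y hy
    obtain rfl := List.eq_of_mem_replicate hx
    obtain ⟨j', hj', hy'⟩ := List.mem_flatMap.mp hy
    obtain rfl := List.eq_of_mem_replicate hy'
    exact_mod_cast Nat.le_of_lt (hp.1 j' hj')

-- the canonical run list is a permutation of the values
theorem pv_canon_perm (ds : List Int) (hb : ∀ d ∈ ds, 0 ≤ d ∧ d ≤ 9) :
    ((List.range' 0 10).flatMap fun j => List.replicate (ds.count ((j:Nat):Int)) (((j:Nat)):Int)).Perm ds := by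
  rw [List.perm_iff_count]
  intro a
  have hr : List.range' 0 10 = [0,1,2,3,4,5,6,7,8,9] := by decide
  rw [hr]
  simp only [List.flatMap_cons, List.flatMap_nil, List.append_nil, List.count_append,
    List.count_replicate]
  by_cases ha : 0 ≤ a ∧ a ≤ 9
  · obtain ⟨ha1, ha2⟩ := ha
    interval_cases a <;> simp
  · have hnm : a ∉ ds := fun hmem => ha (hb a hmem)
    rw [List.count_eq_zero.mpr hnm]
    push_cast
    simp [show a ≠ 0 by omega, show a ≠ 1 by omega, show a ≠ 2 by omega, show a ≠ 3 by omega,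
      show a ≠ 4 by omega, show a ≠ 5 by omega, show a ≠ 6 by omega, show a ≠ 7 by omega,
      show a ≠ 8 by omega, show a ≠ 9 by omega]
    refine ⟨?_,?_,?_,?_,?_,?_,?_,?_,?_,?_⟩ <;> (intro h; omega)

-- sorting digit values yields the canonical run list
theorem pv_sorted_canon (ds : List Int) (hb : ∀ d ∈ ds, 0 ≤ d ∧ d ≤ 9) :
    PySem.List.sorted ds (fun v => v) false
      = (List.range' 0 10).flatMap fun j => List.replicate (ds.count ((j:Nat):Int)) (((j:Nat)):Int) := by
  exact PySem.List.sorted_id_eq_of_perm_of_pairwise ds _ (pv_canon_perm ds hb)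
    (pv_pairwise_canon _ _ (List.pairwise_lt_range' 1))

-- B's first-nonzero scan: either nothing is positive, or the scan splits the index list
theorem pv_firstnz_spec (counts : List Int) : ∀ (js : List Nat),
    (pvBFirstNZ counts js = 0 ∧ ∀ j ∈ js, counts.getD j 0 ≤ 0) ∨
    (∃ l1 l2, js = l1 ++ pvBFirstNZ counts js :: l2 ∧ (∀ j ∈ l1, counts.getD j 0 ≤ 0) ∧
      0 < counts.getD (pvBFirstNZ counts js) 0) := by
  intro js
  induction js with
  | nil => left; exact ⟨rfl, by simp⟩
  | cons j rest ih =>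
    by_cases hj : 0 < counts.getD j 0
    · have hnz : pvBFirstNZ counts (j :: rest) = j := by
        simp only [pvBFirstNZ]; rw [if_pos hj]
      right
      exact ⟨[], rest, by rw [hnz]; rfl, by simp, by rw [hnz]; exact hj⟩
    · have hnz : pvBFirstNZ counts (j :: rest) = pvBFirstNZ counts rest := by
        simp only [pvBFirstNZ]; rw [if_neg hj]
      rw [hnz]
      rcases ih with ⟨h1, h2⟩ | ⟨l1, l2, heq, hz, hpos⟩
      · left
        refine ⟨h1, ?_⟩
        intro i hi
        rcases List.mem_cons.mp hi with rfl | hi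
        · omega
        · exact h2 i hi
      · right
        refine ⟨j :: l1, l2, by rw [List.cons_append, ← heq], ?_, hpos⟩
        intro i hi
        rcases List.mem_cons.mp hi with rfl | hi
        · omega
        · exact hz i hi

-- A's swap loop: no nonzero entry, nothing happens
theorem pv_aswap_none (y : List Int) : ∀ (is : List Nat), (∀ i ∈ is, y.getD i 0 = 0) →
    pvASwap y is = y := by
  intro is
  induction is with
  | nil => simp [pvASwap]
  | cons i rest ih =>
    intro h
    simp only [pvASwap]
    rw [if_neg (not_not_intro (h i (by simp))), ih (fun i' hi' => h i' (by simp [hi']))]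

-- A's swap loop: first nonzero entry is swapped with position 0, then the loop breaks
theorem pv_aswap_find (y : List Int) (i : Nat) (is2 : List Nat) (hi : y.getD i 0 ≠ 0) :
    ∀ (is1 : List Nat), (∀ i' ∈ is1, y.getD i' 0 = 0) →
    pvASwap y (is1 ++ i :: is2) = (y.set 0 (y.getD i 0)).set i (y.getD 0 0) := by
  intro is1
  induction is1 with
  | nil => intro _; simp only [List.nil_append, pvASwap]; rw [if_pos hi]
  | cons i' rest ih =>
    intro h
    simp only [List.cons_append, pvASwap]
    rw [if_neg (not_not_intro (h i' (by simp))), ih (fun i'' hi'' => h i'' (by simp [hi'']))]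

-- prefix-offset version of List.set on an append
theorem pv_set_append (l1 l2 : List Int) (n : Nat) (a : Int) :
    (l1 ++ l2).set (l1.length + n) a = l1 ++ l2.set n a := by
  induction l1 with
  | nil => simp
  | cons x t ih => simp [List.set_cons_succ, Nat.succ_add, ih]

theorem pv_getD_replicate (n i : Nat) : (List.replicate n (0:Int)).getD i 0 = 0 := by
  simp [List.getD, List.getElem?_replicate]
  split <;> simp

theorem pv_flatMap_congr {f g : Nat → List Int} : ∀ (l : List Nat), (∀ x ∈ l, f x = g x) →
    l.flatMap f = l.flatMap g := by
  intro l
  induction l with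
  | nil => intro _; rfl
  | cons x t ih =>
    intro h
    simp only [List.flatMap_cons, h x (by simp), ih (fun y hy => h y (by simp [hy]))]

theorem pv_rep_shift (n : Nat) (l : List Int) : List.replicate n (0:Int) ++ 0 :: l = List.replicate (n+1) (0:Int) ++ l := by
  rw [List.replicate_succ']; simp

-- ===== VERDICT (by name: the statement is the Claim_ definition above) =====
theorem find_min_number_spec : Claim_equal_find_min_number := by
  intro nums _ hpre
  unfold Spec_find_min_number find_min_number find_min_number_alt
  by_cases hlen : (PySem.Str.split₀ nums).length > 10 ∨ (PySem.Str.split₀ nums).length = 1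
  · rw [if_pos hlen, if_pos hlen]
  · rw [if_neg hlen, if_neg hlen]
    by_cases hA : pvACheck (PySem.Str.split₀ nums) = true
    · rw [if_neg (by simp [hA]), pv_bcount_valid _ hA _]
      have hok := pv_acheck_ok _ hA
      have hv : ∀ p ∈ PySem.Str.split₀ nums, 0 ≤ pvVal p ∧ pvVal p ≤ 9 :=
        fun p hp => ⟨pv_val_nonneg p (hok p hp).1, (hok p hp).2⟩
      have hdb : ∀ d ∈ (PySem.Str.split₀ nums).map pvVal, 0 ≤ d ∧ d ≤ 9 := by
        intro d hd; obtain ⟨p, hp, rfl⟩ := List.mem_map.mp hd; exact hv p hp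
      set parts := PySem.Str.split₀ nums with hpartsdef
      set counts := parts.foldl pvStep (List.replicate 10 0) with hcountsdef
      set ds := parts.map pvVal with hdsdef
      have hlen10 : counts.length = 10 := by rw [hcountsdef, pv_fold_length]; simp
      have hget : ∀ j : Nat, j < 10 → counts.getD j 0 = ((ds.count ((j:Nat):Int)) : Int) := by
        intro j hj
        rw [hcountsdef, pv_fold_getD _ hv _ j (by simp) hj]
        have : (List.replicate 10 (0:Int)).getD j 0 = 0 := pv_getD_replicate 10 j
        rw [this]; simp [hdsdef]
      rw [pv_sorted_canon ds hdb]
      dsimp only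
      have hr09 : List.range' 0 10 = 0 :: List.range' 1 9 := rfl
      rcases pv_firstnz_spec counts (List.range' 1 9) with ⟨hnz0, hall⟩ | ⟨l1, l2, hsplit, hz1, hpos⟩
      · -- no nonzero digit: the sorted list is all zeros and neither side swaps
        have hcnt0 : ∀ j ∈ List.range' 1 9, ds.count ((j:Nat):Int) = 0 := by
          intro j hj
          have hj10 : j < 10 := by have := List.mem_range'_1.mp hj; omega
          have h := hall j hj
          rw [hget j hj10] at h
          omega
        have hflat : (List.range' 1 9).flatMap (fun j => List.replicate (ds.count ((j:Nat):Int)) (((j:Nat)):Int)) = [] := by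
          rw [List.flatMap_eq_nil_iff]
          intro j hj
          simp [hcnt0 j hj]
        have hcanon : ((List.range' 0 10).flatMap fun j => List.replicate (ds.count ((j:Nat):Int)) (((j:Nat)):Int))
            = List.replicate (ds.count 0) (0:Int) := by
          rw [hr09, List.flatMap_cons, hflat]
          simp
        rw [hcanon]
        have hy0 : (List.replicate (ds.count 0) (0:Int)).getD 0 0 = 0 := pv_getD_replicate _ 0
        rw [if_pos hy0, pv_aswap_none _ _ (fun i _ => pv_getD_replicate _ i)]
        rw [if_neg (by simp [hnz0])]
        rw [pv_build_eq, pv_buildJoin (fun j => ds.count ((j:Nat):Int)) _ counts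
          (fun j hj => hget j (by have := List.mem_range'_1.mp hj; omega))]
        rw [hcanon]
        simp
      · -- a nonzero digit exists: A swaps it to the front, B builds that string directly
        have hnzmem : pvBFirstNZ counts (List.range' 1 9) ∈ List.range' 1 9 := by
          have h : pvBFirstNZ counts (List.range' 1 9)
              ∈ l1 ++ pvBFirstNZ counts (List.range' 1 9) :: l2 :=
            List.mem_append_right _ (List.mem_cons_self ..)
          rw [← hsplit] at h
          exact h
        obtain ⟨hnz1, hnz10'⟩ := List.mem_range'_1.mp hnzmem
        set nz := pvBFirstNZ counts (List.range' 1 9) with hnzdef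
        have hnz10 : nz < 10 := by omega
        have hcntnz : 1 ≤ ds.count ((nz:Nat):Int) := by
          have h := hpos; rw [hget nz hnz10] at h; omega
        have hninl1 : ∀ j ∈ l1, j ≠ nz := by
          intro j hj heq
          have h := hz1 j hj; rw [heq] at h; omega
        have hl1cnt : ∀ j ∈ l1, ds.count ((j:Nat):Int) = 0 := by
          intro j hj
          have hjm : j ∈ List.range' 1 9 := by rw [hsplit]; exact List.mem_append_left _ hj
          have hj10 : j < 10 := by have := List.mem_range'_1.mp hjm; omega
          have h := hz1 j hj; rw [hget j hj10] at h; omega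
        have hflat1 : l1.flatMap (fun j => List.replicate (ds.count ((j:Nat):Int)) (((j:Nat)):Int)) = [] := by
          rw [List.flatMap_eq_nil_iff]; intro j hj; simp [hl1cnt j hj]
        have hnzl2 : nz ∉ l2 := by
          have hnd : (List.range' 1 9).Nodup := List.nodup_range' 1
          rw [hsplit] at hnd
          exact (List.nodup_cons.mp hnd.of_append_right).1
        have hcanon : ((List.range' 0 10).flatMap fun j => List.replicate (ds.count ((j:Nat):Int)) (((j:Nat)):Int))
            = List.replicate (ds.count ((0:Nat):Int)) (((0:Nat)):Int)
              ++ (((nz:Nat):Int) :: (List.replicate (ds.count ((nz:Nat):Int) - 1) (((nz:Nat)):Int)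
                    ++ l2.flatMap (fun j => List.replicate (ds.count ((j:Nat):Int)) (((j:Nat)):Int)))) := by
          rw [hr09, List.flatMap_cons, hsplit, List.flatMap_append, hflat1, List.flatMap_cons]
          rw [show ds.count ((nz:Nat):Int) = (ds.count ((nz:Nat):Int) - 1) + 1 from by omega,
            List.replicate_succ]
          simp
        by_cases hc0 : ds.count ((0:Nat):Int) = 0
        · -- no zeros at all: no swap on A's side, no special front on B's
          rw [hcanon, hc0, List.replicate_zero, List.nil_append]
          rw [if_neg (by rw [List.getD_cons_zero]; omega)]
          rw [if_neg (by rw [hget 0 (by omega), hc0]; exact fun h => by simpa using h.1)]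
          rw [pv_build_eq, pv_buildJoin (fun j => ds.count ((j:Nat):Int)) _ counts
            (fun j hj => hget j (by have := List.mem_range'_1.mp hj; omega))]
          rw [hcanon, hc0, List.replicate_zero, List.nil_append]
          simp
        · -- zeros present: A swaps the first nonzero with position 0
          obtain ⟨m, hm⟩ : ∃ m, ds.count ((0:Nat):Int) = m + 1 := ⟨ds.count ((0:Nat):Int) - 1, by omega⟩
          rw [hcanon, hm]
          set T := List.replicate (ds.count ((nz:Nat):Int) - 1) (((nz:Nat)):Int)
            ++ l2.flatMap (fun j => List.replicate (ds.count ((j:Nat):Int)) (((j:Nat)):Int)) with hTdef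
          set y := List.replicate (m+1) (((0:Nat)):Int) ++ ((nz:Nat):Int) :: T with hydef
          have hylen : y.length = (m+1) + (T.length + 1) := by simp [hydef]
          have hy0 : y.getD 0 0 = 0 := by
            rw [hydef, List.getD_append _ _ _ _ (by simp)]
            simpa using pv_getD_replicate (m+1) 0
          rw [if_pos hy0]
          have hrange : List.range' 1 (y.length - 1)
              = List.range' 1 m ++ ((m+1) :: List.range' (m+2) T.length) := by
            rw [show y.length - 1 = m + (T.length + 1) from by omega]
            rw [← List.range'_append]
            rw [show 1 + 1 * m = m + 1 from by omega]
            rw [List.range'_succ]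
          have hfind : y.getD (m+1) 0 = ((nz:Nat):Int) := by
            rw [hydef, List.getD_append_right _ _ _ _ (by simp)]
            simp
          have hzero : ∀ i ∈ List.range' 1 m, y.getD i 0 = 0 := by
            intro i hi
            have hib := List.mem_range'_1.mp hi
            rw [hydef, List.getD_append _ _ _ _ (by simp; omega)]
            simpa using pv_getD_replicate (m+1) i

          rw [hrange, pv_aswap_find y (m+1) _ (by rw [hfind]; omega) _ hzero]
          rw [hfind, hy0]
          have hy' : (y.set 0 ((nz:Nat):Int)).set (m+1) 0
              = ((nz:Nat):Int) :: (List.replicate (m+1) (((0:Nat)):Int) ++ T) := by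
            rw [hydef, List.replicate_succ, List.cons_append, List.set_cons_zero, List.set_cons_succ]
            rw [show (List.replicate m (((0:Nat)):Int) ++ ((nz:Nat):Int) :: T).set m 0
                  = List.replicate m (((0:Nat)):Int) ++ (((nz:Nat):Int) :: T).set 0 0 from by
              have := pv_set_append (List.replicate m (((0:Nat)):Int)) (((nz:Nat):Int) :: T) 0 0
              simpa using this]
            rw [List.set_cons_zero]
            simp only [Nat.cast_zero]
            rw [pv_rep_shift, List.replicate_succ]
          rw [hy']
          -- B side
          rw [if_pos ⟨by rw [hget 0 (by omega), hm]; omega, by omega⟩]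
          rw [pv_build_eq, pv_buildJoin
            (fun j => if j = nz then ds.count ((nz:Nat):Int) - 1 else ds.count ((j:Nat):Int)) _ _ ?hg]
          case hg =>
            intro j hj
            have hj10 : j < 10 := by have := List.mem_range'_1.mp hj; omega
            simp only [List.getD]
            by_cases hje : j = nz
            · subst hje
              rw [List.getElem?_set_self (by omega)]
              have h1 := hget nz hnz10
              simp only [List.getD] at h1
              simp only [Option.getD_some, if_true]
              rw [h1]
              omega
            · rw [List.getElem?_set_ne (fun h => hje h.symm)]
              simp only [if_neg hje]
              have h2 := hget j hj10
              simp only [List.getD] at h2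
              exact h2
          have hcongr : l2.flatMap (fun j => List.replicate
                ((if j = nz then ds.count ((nz:Nat):Int) - 1 else ds.count ((j:Nat):Int))) (((j:Nat)):Int))
              = l2.flatMap (fun j => List.replicate (ds.count ((j:Nat):Int)) (((j:Nat)):Int)) :=
            pv_flatMap_congr l2 (fun j hj => by rw [if_neg (fun h : j = nz => hnzl2 (h ▸ hj))])
          have hflatg : (List.range' 1 9).flatMap (fun j => List.replicate
                ((if j = nz then ds.count ((nz:Nat):Int) - 1 else ds.count ((j:Nat):Int))) (((j:Nat)):Int)) = T := by
            rw [hsplit, List.flatMap_append, List.flatMap_cons]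
            have hl1 : l1.flatMap (fun j => List.replicate
                ((if j = nz then ds.count ((nz:Nat):Int) - 1 else ds.count ((j:Nat):Int))) (((j:Nat)):Int)) = [] := by
              rw [List.flatMap_eq_nil_iff]
              intro j hj
              rw [if_neg (hninl1 j hj)]
              simp [hl1cnt j hj]
            rw [hl1, if_pos rfl, hcongr, hTdef]
            simp
          rw [hflatg]
          have hB0 : (counts.set nz (counts.getD nz 0 - 1)).getD 0 0 = (((m+1):Nat):Int) := by
            simp only [List.getD]
            rw [List.getElem?_set_ne (by omega : nz ≠ 0)]
            have h0 := hget 0 (by omega)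
            simp only [List.getD] at h0
            rw [h0, hm]
          rw [hB0]
          rw [List.map_cons, pv_sjoin_cons, List.map_append, pv_sjoin_append]
          have hmul : pvStrMul "0" (((m+1):Nat):Int)
              = PySem.Str.join "" ((List.replicate (m+1) (((0:Nat)):Int)).map PySem.Int.toStr) := by
            have h00 : PySem.Int.toStr ((0:Nat):Int) = "0" := rfl
            have h := pv_strMul_join 0 (m+1)
            rw [h00] at h
            exact h
          rw [hmul, ← String.append_assoc]
    · have hA' : pvACheck (PySem.Str.split₀ nums) = false := by simpa using hA
      rw [if_pos hA', pv_bcount_invalid _ hA' _]
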